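-- pv_equiv track=rewrite | github.com/pypi-data/pypi-mirror-263 | packages/pageserver/pageserver-0.0.1.tar.gz/pageserver-0.0.1/src/pageserver/utils/byteslib.py | utf8decode
-- ===== SOURCE A (Python) =====
-- def utf8decode(arr):
--     res = ""
--     i = 0
--     l = len(arr)
--     while i < l:
--         v = arr[i]
--         c = v
--         if v > 239:  # 0b11110000 = 240
--             c = (v & 7) << 18
--             c |= (arr[i+1] & 63) << 12
--             c |= (arr[i+2] & 63) << 6
--             c |= arr[i+3] & 63
--             i += 3
--         elif v > 223:  # 0b11100000 = 224
--             c = (v & 15) << 12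
--             c |= (arr[i+1] & 63) << 6
--             c |= arr[i+2] & 63
--             i += 2
--         elif v > 191:  # 0b11000000 = 192
--             c = (v & 0b00011111) << 6
--             c |= arr[i+1] & 63
--             i += 1
--         res += chr(c)
--         i += 1
--     return res
-- ===== SOURCE B (Python) =====
-- def _decode(frame):
--     # lead-byte payload via modulus table keyed on frame length; pure arithmetic, no bit ops
--     if len(frame) == 1:
--         return frame[0]
--     c = frame[0] % {2: 32, 3: 16, 4: 8}[len(frame)]
--     for b in frame[1:]:
--         c = c * 64 + b % 64
--     return c
--
-- def utf8decode(arr):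
--     # stage 1: split the byte list into frames by counting thresholds below the lead byte
--     frames = []
--     rest = arr
--     while rest:
--         n = sum(rest[0] > t for t in (191, 223, 239))
--         frames.append(rest[:n + 1])
--         rest = rest[n + 1:]
--     # stage 2: decode each frame arithmetically and join once
--     return "".join(chr(_decode(f)) for f in frames)
-- ===== Notes on version B (the rewrite author's own statement) =====
-- stated objective: alternative
-- what changed: A's single-pass index loop with three unrolled bitwise shift/OR branches becomes two staged passes: split the list into frames whose length is the count of lead-byte thresholds the lead byte exceeds, then decode each frame by a purely arithmetic fold c = c*64 + b%64 seeded from a modulus table keyed on frame length, joining once at the end.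
import Mathlib
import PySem

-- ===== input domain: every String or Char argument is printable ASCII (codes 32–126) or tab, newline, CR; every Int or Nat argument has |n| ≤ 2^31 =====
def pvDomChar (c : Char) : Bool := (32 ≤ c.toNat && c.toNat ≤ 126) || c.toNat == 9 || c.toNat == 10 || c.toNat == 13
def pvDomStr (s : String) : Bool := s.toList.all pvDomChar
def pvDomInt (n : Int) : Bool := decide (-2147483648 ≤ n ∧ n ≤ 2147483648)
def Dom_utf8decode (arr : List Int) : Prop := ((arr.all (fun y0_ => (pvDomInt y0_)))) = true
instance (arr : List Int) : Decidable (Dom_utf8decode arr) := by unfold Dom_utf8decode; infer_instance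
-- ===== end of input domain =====

-- B replaces A's single-pass index loop with unrolled shift/OR branches by two staged
-- passes: split the bytes into frames (frame length = count of thresholds below the lead
-- byte), then decode each frame by a purely arithmetic fold (mod/ multiply/ add, no bit
-- operations) and join once (objective: alternative).

-- ===== PORT A =====
-- the while loop over index i, expressed as recursion on the not-yet-consumed suffix
-- (arr[i] = head, arr[i+k] = rest[k-1]); out-of-range reads (IndexError in Python)
-- are excluded by Pre_, pyGetD's default is never reached there
def utf8decodeGoA (arr : List Int) : List Char :=
  match arr with
  | [] => []
  | v :: rest =>
    if v > 239 then
      let c1 : Int := (PySem.Int.band v 7) <<< (18 : Nat)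
      let c2 : Int := PySem.Int.bor c1 ((PySem.Int.band (PySem.List.pyGetD rest 0 0) 63) <<< (12 : Nat))
      let c3 : Int := PySem.Int.bor c2 ((PySem.Int.band (PySem.List.pyGetD rest 1 0) 63) <<< (6 : Nat))
      let c : Int := PySem.Int.bor c3 (PySem.Int.band (PySem.List.pyGetD rest 2 0) 63)
      Char.ofNat c.toNat :: utf8decodeGoA (rest.drop 3)
    else if v > 223 then
      let c1 : Int := (PySem.Int.band v 15) <<< (12 : Nat)
      let c2 : Int := PySem.Int.bor c1 ((PySem.Int.band (PySem.List.pyGetD rest 0 0) 63) <<< (6 : Nat))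
      let c : Int := PySem.Int.bor c2 (PySem.Int.band (PySem.List.pyGetD rest 1 0) 63)
      Char.ofNat c.toNat :: utf8decodeGoA (rest.drop 2)
    else if v > 191 then
      let c1 : Int := (PySem.Int.band v 31) <<< (6 : Nat)
      let c : Int := PySem.Int.bor c1 (PySem.Int.band (PySem.List.pyGetD rest 0 0) 63)
      Char.ofNat c.toNat :: utf8decodeGoA (rest.drop 1)
    else
      Char.ofNat v.toNat :: utf8decodeGoA rest
  termination_by arr.length
  decreasing_by all_goals simp [List.length_drop]

def utf8decode (arr : List Int) : String := String.ofList (utf8decodeGoA arr)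

-- ===== PORT B =====
-- n = sum(rest[0] > t for t in (191, 223, 239))
def utf8leadCount (v : Int) : Int :=
  ([(191 : Int), 223, 239].map (fun t => if v > t then (1 : Int) else 0)).sum

-- termination lemma for the splitter (cited in decreasing_by)
theorem utf8leadCount_nonneg (v : Int) : 0 ≤ utf8leadCount v := by
  unfold utf8leadCount; dsimp; split_ifs <;> norm_num

-- stage 1: the while loop collecting rest[:n+1] and continuing on rest[n+1:];
-- n+1 ≥ 1, so take/drop (n+1).toNat are exactly Python's nonnegative slices
def utf8frames (rest : List Int) : List (List Int) :=
  match rest with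
  | [] => []
  | v :: t =>
    let n := utf8leadCount v
    ((v :: t).take (n + 1).toNat) :: utf8frames ((v :: t).drop (n + 1).toNat)
  termination_by rest.length
  decreasing_by
    simp only [List.length_drop, List.length_cons]
    have h := utf8leadCount_nonneg v
    omega

-- the dict literal {2: 32, 3: 16, 4: 8}
def utf8maskTable : PySem.Dict Int Int := PySem.Dict.ofList [(2, 32), (3, 16), (4, 8)]

-- _decode(frame); the table key is always present for frames the splitter produces
-- (lengths 2–4 land on a key, length 1 takes the first branch), so Python's
-- KeyError is unreachable and getD's default is never read
def utf8decodeFrame (f : List Int) : Int :=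
  if f.length == 1 then PySem.List.pyGetD f 0 0
  else
    let m : Int := PySem.Dict.getD utf8maskTable (f.length : Int) 0
    (PySem.List.slice f (some 1) none).foldl
      (fun c b => c * 64 + PySem.Int.mod b 64)
      (PySem.Int.mod (PySem.List.pyGetD f 0 0) m)

def utf8decode_alt (arr : List Int) : String :=
  String.ofList ((utf8frames arr).map (fun f => Char.ofNat (utf8decodeFrame f).toNat))

-- ===== PRECONDITION & SPEC =====
-- Pre_ admits exactly the inputs on which Python A returns a Lean-representable string:
-- every multi-byte lead byte has its continuation bytes present (else IndexError), every
-- standalone byte is nonnegative and every decoded code point is ≤ 0x10FFFF (else chr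
-- raises ValueError), and no decoded code point is a UTF-16 surrogate (0xD800–0xDFFF):
-- there Python A RETURNS a lone-surrogate str that a Lean String (Unicode scalar
-- values only) cannot represent, so those inputs are excluded although A returns.
def utf8ok (arr : List Int) : Bool :=
  match arr with
  | [] => true
  | v :: rest =>
    if v > 239 then
      match rest with
      | b1 :: b2 :: b3 :: rest' =>
        let c : Int := PySem.Int.bor (PySem.Int.bor (PySem.Int.bor ((PySem.Int.band v 7) <<< (18 : Nat))
          ((PySem.Int.band b1 63) <<< (12 : Nat))) ((PySem.Int.band b2 63) <<< (6 : Nat))) (PySem.Int.band b3 63)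
        (decide (c ≤ 1114111 ∧ (c < 55296 ∨ 57343 < c))) && utf8ok rest'
      | _ => false
    else if v > 223 then
      match rest with
      | b1 :: b2 :: rest' =>
        let c : Int := PySem.Int.bor (PySem.Int.bor ((PySem.Int.band v 15) <<< (12 : Nat))
          ((PySem.Int.band b1 63) <<< (6 : Nat))) (PySem.Int.band b2 63)
        (decide (c < 55296 ∨ 57343 < c)) && utf8ok rest'
      | _ => false
    else if v > 191 then
      match rest with
      | _ :: rest' => utf8ok rest'
      | [] => false
    else
      decide (0 ≤ v) && utf8ok rest

def Pre_utf8decode (arr : List Int) : Prop := utf8ok arr = true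
instance (arr : List Int) : Decidable (Pre_utf8decode arr) := by unfold Pre_utf8decode; infer_instance

def pvWitness_utf8decode : List Int := [72, 105, 228, 184, 173, 194, 161]

def Spec_utf8decode (arr : List Int) (out : String) : Prop := out = utf8decode_alt arr
instance (arr : List Int) (out : String) : Decidable (Spec_utf8decode arr out) := by unfold Spec_utf8decode; infer_instance

-- ===== CLAIM (what is proved, stated in full; the proofs are below) =====
def Claim_equal_utf8decode : Prop := ∀ (arr : List Int), Dom_utf8decode arr → Pre_utf8decode arr → Spec_utf8decode arr (utf8decode arr)

-- ===== LEMMAS AND PROOFS =====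

-- Python's x & (2^k - 1) is x % 2^k, for every int x (two's complement = modulus)
theorem pv_band7 (a : Int) : PySem.Int.band a 7 = PySem.Int.mod a 8 := by
  rw [PySem.Int.band, PySem.Int.mod, Int.fmod_eq_emod]
  have h1 := Nat.and_two_pow_sub_one_eq_mod a.toNat 3
  have h2 := Nat.and_two_pow_sub_one_eq_mod ((-a).toNat - 1) 3
  norm_num at h1 h2 ⊢
  split_ifs <;> simp_all [Nat.and_comm] <;> try omega

theorem pv_band15 (a : Int) : PySem.Int.band a 15 = PySem.Int.mod a 16 := by
  rw [PySem.Int.band, PySem.Int.mod, Int.fmod_eq_emod]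
  have h1 := Nat.and_two_pow_sub_one_eq_mod a.toNat 4
  have h2 := Nat.and_two_pow_sub_one_eq_mod ((-a).toNat - 1) 4
  norm_num at h1 h2 ⊢
  split_ifs <;> simp_all [Nat.and_comm] <;> try omega

theorem pv_band31 (a : Int) : PySem.Int.band a 31 = PySem.Int.mod a 32 := by
  rw [PySem.Int.band, PySem.Int.mod, Int.fmod_eq_emod]
  have h1 := Nat.and_two_pow_sub_one_eq_mod a.toNat 5
  have h2 := Nat.and_two_pow_sub_one_eq_mod ((-a).toNat - 1) 5
  norm_num at h1 h2 ⊢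
  split_ifs <;> simp_all [Nat.and_comm] <;> try omega

theorem pv_band63 (a : Int) : PySem.Int.band a 63 = PySem.Int.mod a 64 := by
  rw [PySem.Int.band, PySem.Int.mod, Int.fmod_eq_emod]
  have h1 := Nat.and_two_pow_sub_one_eq_mod a.toNat 6
  have h2 := Nat.and_two_pow_sub_one_eq_mod ((-a).toNat - 1) 6
  norm_num at h1 h2 ⊢
  split_ifs <;> simp_all [Nat.and_comm] <;> try omega

-- q·64 | y = q·64 + y when 0 ≤ y < 64 (disjoint bit ranges)
theorem pv_or_add6 (q y : Int) (hq : 0 ≤ q) (hy : 0 ≤ y) (hyk : y < 64) :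
    PySem.Int.bor (q <<< (6 : Nat)) y = q * 64 + y := by
  have hsh : q <<< (6 : Nat) = q * 64 := by rw [Int.shiftLeft_eq]; norm_num
  rw [PySem.Int.bor_of_nonneg (by omega : (0:Int) ≤ q <<< (6:Nat)) hy, hsh]
  have ht : (q * 64).toNat = q.toNat <<< 6 := by rw [Nat.shiftLeft_eq]; omega
  rw [ht, ← Nat.shiftLeft_add_eq_or_of_lt (by omega : y.toNat < 2 ^ 6)]
  rw [Nat.shiftLeft_eq]; push_cast; omega

theorem pv_shl_nonneg (a : Int) (ha : 0 ≤ a) (k : Nat) : 0 ≤ a <<< k := by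
  rw [Int.shiftLeft_eq]; positivity

theorem pv_shl_shl (a : Int) (j k : Nat) : (a <<< j) <<< k = a <<< (j + k) := by
  rw [Int.shiftLeft_eq, Int.shiftLeft_eq, Int.shiftLeft_eq, pow_add]; ring

-- a | b for nonnegative ints lifts the Nat-level or, which distributes over shifts
theorem pv_bor_shift (a b : Int) (ha : 0 ≤ a) (hb : 0 ≤ b) (k : Nat) :
    (PySem.Int.bor a b) <<< k = PySem.Int.bor (a <<< k) (b <<< k) := by
  rw [PySem.Int.bor_of_nonneg ha hb]
  have hsh : ∀ m : Nat, ((m:Int) <<< k) = ((m <<< k : Nat) : Int) := by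
    intro m; rw [Int.shiftLeft_eq, Nat.shiftLeft_eq]; push_cast; ring
  rw [hsh, Nat.shiftLeft_or_distrib, ← PySem.Int.bor_natCast, ← hsh, ← hsh,
      Int.toNat_of_nonneg ha, Int.toNat_of_nonneg hb]

-- A's two-continuation shift/OR chain is B's two-step arithmetic accumulation
theorem pv_c3 (v b1 b2 : Int) :
    PySem.Int.bor (PySem.Int.bor ((PySem.Int.band v 15) <<< (12 : Nat))
        ((PySem.Int.band b1 63) <<< (6 : Nat))) (PySem.Int.band b2 63)
    = ((PySem.Int.mod v 16) * 64 + PySem.Int.mod b1 64) * 64 + PySem.Int.mod b2 64 := by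
  rw [pv_band15, pv_band63, pv_band63]
  have hm := PySem.Int.mod_nonneg v (by norm_num : (0:Int) < 16)
  have h1 := PySem.Int.mod_nonneg b1 (by norm_num : (0:Int) < 64)
  have h1' := PySem.Int.mod_lt b1 (by norm_num : (0:Int) < 64)
  have h2 := PySem.Int.mod_nonneg b2 (by norm_num : (0:Int) < 64)
  have h2' := PySem.Int.mod_lt b2 (by norm_num : (0:Int) < 64)
  rw [show (12 : Nat) = 6 + 6 from rfl, ← pv_shl_shl (PySem.Int.mod v 16) 6 6,
      ← pv_bor_shift _ _ (pv_shl_nonneg _ hm 6) h1 6,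
      pv_or_add6 _ _ hm h1 h1',
      pv_or_add6 _ _ (by positivity) h2 h2']

-- A's three-continuation shift/OR chain is B's three-step arithmetic accumulation
theorem pv_c4 (v b1 b2 b3 : Int) :
    PySem.Int.bor (PySem.Int.bor (PySem.Int.bor ((PySem.Int.band v 7) <<< (18 : Nat))
        ((PySem.Int.band b1 63) <<< (12 : Nat))) ((PySem.Int.band b2 63) <<< (6 : Nat)))
      (PySem.Int.band b3 63)
    = (((PySem.Int.mod v 8) * 64 + PySem.Int.mod b1 64) * 64 + PySem.Int.mod b2 64) * 64
        + PySem.Int.mod b3 64 := by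
  rw [pv_band7, pv_band63, pv_band63, pv_band63]
  have hm := PySem.Int.mod_nonneg v (by norm_num : (0:Int) < 8)
  have h1 := PySem.Int.mod_nonneg b1 (by norm_num : (0:Int) < 64)
  have h1' := PySem.Int.mod_lt b1 (by norm_num : (0:Int) < 64)
  have h2 := PySem.Int.mod_nonneg b2 (by norm_num : (0:Int) < 64)
  have h2' := PySem.Int.mod_lt b2 (by norm_num : (0:Int) < 64)
  have h3 := PySem.Int.mod_nonneg b3 (by norm_num : (0:Int) < 64)
  have h3' := PySem.Int.mod_lt b3 (by norm_num : (0:Int) < 64)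
  have e18 : ∀ a : Int, a <<< (18 : Nat) = ((a <<< (6:Nat)) <<< (6:Nat)) <<< (6:Nat) := by
    intro a; rw [pv_shl_shl, pv_shl_shl]
  have e12 : ∀ a : Int, a <<< (12 : Nat) = (a <<< (6:Nat)) <<< (6:Nat) := by
    intro a; rw [pv_shl_shl]
  rw [e18, e12,
      ← pv_bor_shift ((PySem.Int.mod v 8) <<< (6:Nat) <<< (6:Nat)) ((PySem.Int.mod b1 64) <<< (6:Nat))
        (pv_shl_nonneg _ (pv_shl_nonneg _ hm 6) 6) (pv_shl_nonneg _ h1 6) 6,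
      ← pv_bor_shift ((PySem.Int.mod v 8) <<< (6:Nat)) (PySem.Int.mod b1 64)
        (pv_shl_nonneg _ hm 6) h1 6,
      pv_or_add6 _ _ hm h1 h1',
      ← pv_bor_shift ((PySem.Int.mod v 8 * 64 + PySem.Int.mod b1 64) <<< (6:Nat)) (PySem.Int.mod b2 64)
        (pv_shl_nonneg _ (by positivity) 6) h2 6,
      pv_or_add6 _ _ (by positivity) h2 h2',
      pv_or_add6 _ _ (by positivity) h3 h3']

-- single-continuation case is pv_or_add6 directly
theorem pv_c2 (v b1 : Int) :
    PySem.Int.bor ((PySem.Int.band v 31) <<< (6 : Nat)) (PySem.Int.band b1 63)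
    = (PySem.Int.mod v 32) * 64 + PySem.Int.mod b1 64 := by
  rw [pv_band31, pv_band63]
  exact pv_or_add6 _ _ (PySem.Int.mod_nonneg v (by norm_num))
    (PySem.Int.mod_nonneg b1 (by norm_num)) (PySem.Int.mod_lt b1 (by norm_num))

-- evaluating the threshold count on each lead-byte class
theorem pv_leadCount_4 (v : Int) (h : v > 239) : utf8leadCount v = 3 := by
  unfold utf8leadCount
  simp only [List.map_cons, List.map_nil, List.sum_cons, List.sum_nil]
  rw [if_pos (by omega), if_pos (by omega), if_pos (by omega)]; norm_num

theorem pv_leadCount_3 (v : Int) (h1 : ¬ v > 239) (h2 : v > 223) : utf8leadCount v = 2 := by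
  unfold utf8leadCount
  simp only [List.map_cons, List.map_nil, List.sum_cons, List.sum_nil]
  rw [if_pos (by omega), if_pos (by omega), if_neg (by omega)]; norm_num

theorem pv_leadCount_2 (v : Int) (h1 : ¬ v > 223) (h2 : v > 191) : utf8leadCount v = 1 := by
  unfold utf8leadCount
  simp only [List.map_cons, List.map_nil, List.sum_cons, List.sum_nil]
  rw [if_pos (by omega), if_neg (by omega), if_neg (by omega)]; norm_num

theorem pv_leadCount_1 (v : Int) (h1 : ¬ v > 191) : utf8leadCount v = 0 := by
  unfold utf8leadCount
  simp only [List.map_cons, List.map_nil, List.sum_cons, List.sum_nil]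
  rw [if_neg (by omega), if_neg (by omega), if_neg (by omega)]; norm_num

-- the two loop shapes produce the same characters on every input Pre_ admits
theorem pv_goA_eq_frames (arr : List Int) (hpre : utf8ok arr = true) :
    utf8decodeGoA arr = (utf8frames arr).map (fun f => Char.ofNat (utf8decodeFrame f).toNat) := by
  induction arr using utf8decodeGoA.induct with
  | case1 => rw [utf8decodeGoA, utf8frames]; rfl
  | case2 v rest h1 ih =>
    rw [utf8ok.eq_def] at hpre
    simp only [if_pos h1] at hpre
    rcases rest with _ | ⟨b1, _ | ⟨b2, _ | ⟨b3, rest'⟩⟩⟩ <;> simp only [] at hpre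
    · exact absurd hpre (by simp)
    · exact absurd hpre (by simp)
    · exact absurd hpre (by simp)
    rw [Bool.and_eq_true] at hpre
    rw [utf8decodeGoA, if_pos h1, utf8frames]
    simp only [pv_leadCount_4 v h1]
    norm_num
    refine ⟨?_, ?_⟩
    · have hfr : utf8decodeFrame (List.take (Int.toNat 4) (v :: b1 :: b2 :: b3 :: rest'))
          = (((PySem.Int.mod v 8) * 64 + PySem.Int.mod b1 64) * 64 + PySem.Int.mod b2 64) * 64
              + PySem.Int.mod b3 64 := by
        rw [show List.take (Int.toNat 4) (v :: b1 :: b2 :: b3 :: rest') = [v, b1, b2, b3] from rfl]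
        rw [utf8decodeFrame]
        norm_num
        rw [PySem.List.slice_from_one,
            show PySem.Dict.getD utf8maskTable (4 : Int) 0 = 8 from by decide]
        norm_num [PySem.List.pyGetD, List.foldl]
      rw [hfr, ← pv_c4,
          show PySem.List.pyGetD (b1 :: b2 :: b3 :: rest') 1 0 = b2 from by
            simp [PySem.List.pyGetD_ofNat'],
          show PySem.List.pyGetD (b1 :: b2 :: b3 :: rest') 2 0 = b3 from by
            simp [PySem.List.pyGetD_ofNat']]
    · rw [show List.drop (Int.toNat 4) (v :: b1 :: b2 :: b3 :: rest') = rest' from rfl]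
      exact ih hpre.2
  | case3 v rest h1 h2 ih =>
    rw [utf8ok.eq_def] at hpre
    simp only [if_neg h1, if_pos h2] at hpre
    rcases rest with _ | ⟨b1, _ | ⟨b2, rest'⟩⟩ <;> simp only [] at hpre
    · exact absurd hpre (by simp)
    · exact absurd hpre (by simp)
    rw [Bool.and_eq_true] at hpre
    rw [utf8decodeGoA, if_neg h1, if_pos h2, utf8frames]
    simp only [pv_leadCount_3 v h1 h2]
    norm_num
    refine ⟨?_, ?_⟩
    · have hfr : utf8decodeFrame (List.take (Int.toNat 3) (v :: b1 :: b2 :: rest'))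
          = ((PySem.Int.mod v 16) * 64 + PySem.Int.mod b1 64) * 64 + PySem.Int.mod b2 64 := by
        rw [show List.take (Int.toNat 3) (v :: b1 :: b2 :: rest') = [v, b1, b2] from rfl]
        rw [utf8decodeFrame]
        norm_num
        rw [PySem.List.slice_from_one,
            show PySem.Dict.getD utf8maskTable (3 : Int) 0 = 16 from by decide]
        norm_num [PySem.List.pyGetD, List.foldl]
      rw [hfr, ← pv_c3,
          show PySem.List.pyGetD (b1 :: b2 :: rest') 1 0 = b2 from by
            simp [PySem.List.pyGetD_ofNat']]
    · rw [show List.drop (Int.toNat 3) (v :: b1 :: b2 :: rest') = rest' from rfl]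
      exact ih hpre.2
  | case4 v rest h1 h2 h3 ih =>
    rw [utf8ok.eq_def] at hpre
    simp only [if_neg h1, if_neg h2, if_pos h3] at hpre
    rcases rest with _ | ⟨b1, rest'⟩
    · exact absurd hpre (by simp)
    rw [utf8decodeGoA, if_neg h1, if_neg h2, if_pos h3, utf8frames]
    simp only [pv_leadCount_2 v h2 h3]
    norm_num
    refine ⟨?_, ?_⟩
    · have hfr : utf8decodeFrame (List.take (Int.toNat 2) (v :: b1 :: rest'))
          = (PySem.Int.mod v 32) * 64 + PySem.Int.mod b1 64 := by
        rw [show List.take (Int.toNat 2) (v :: b1 :: rest') = [v, b1] from rfl]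
        rw [utf8decodeFrame]
        norm_num
        rw [PySem.List.slice_from_one,
            show PySem.Dict.getD utf8maskTable (2 : Int) 0 = 32 from by decide]
        norm_num [PySem.List.pyGetD, List.foldl]
      rw [hfr, ← pv_c2]
    · rw [show List.drop (Int.toNat 2) (v :: b1 :: rest') = rest' from rfl]
      exact ih hpre
  | case5 v rest h1 h2 h3 ih =>
    rw [utf8ok.eq_def] at hpre
    simp only [if_neg h1, if_neg h2, if_neg h3] at hpre
    rw [Bool.and_eq_true] at hpre
    rw [utf8decodeGoA, if_neg h1, if_neg h2, if_neg h3, utf8frames]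
    simp only [pv_leadCount_1 v h3]
    norm_num
    refine ⟨?_, ?_⟩
    · rfl
    · exact ih hpre.2

-- ===== VERDICT (by name: the statement is the Claim_ definition above) =====
theorem utf8decode_spec : Claim_equal_utf8decode := by
  intro arr _ hpre
  unfold Spec_utf8decode utf8decode utf8decode_alt
  rw [pv_goA_eq_frames arr hpre]
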